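-- pv_equiv track=rewrite | github.com/DavidToh2/Coding-Problems | Miscellaneous/2021 Google Foobar/L4-Bunnies-and-Keys.py | solution
-- ===== SOURCE A (Python) =====
-- def solution(s, t):
--     n = comb(s, t-1)
--     m = comb(s-1, t-1)
--     binaryList = generate_binary(s, t-1)
--     solutionList = []
--     for j in range(0, s, 1):
--         solutionList.append([])
--     for i in range(0, n, 1):
--         targetList = binaryList[-i-1]
--         for k in range(0, s, 1):
--             if targetList[k] == 1:
--                 solutionList[k].append(i)
--
--     return solutionList
--
-- def comb(n,r):
--     if n == 0:
--         return 1
--     elif r == 0 or r == n: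
--         return 1
--     else:
--         answer = comb(n-1,r-1)+comb(n-1,r)
--         return answer
--
-- def generate_binary(size, no_of_zeroes):
--     if size == 1:
--         if no_of_zeroes == 1:
--             return [[0]]
--         else:
--             return [[1]]
--     elif size == no_of_zeroes:
--         add_zeroo = generate_binary(size - 1, no_of_zeroes - 1)
--         for k in add_zeroo:
--             k.insert(0,0)
--         return add_zeroo
--     else:
--         add_one = generate_binary(size - 1, no_of_zeroes)
--         for j in add_one:
--             j.insert(0,1)
--         if no_of_zeroes == 0:
--             return add_one
--         else:
--             add_zero = generate_binary(size - 1, no_of_zeroes - 1)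
--             for k in add_zero:
--                 k.insert(0,0)
--             return add_zero + add_one
-- ===== SOURCE B (Python) =====
-- def solution(s, t):
--     if s < 1 or t < 1 or t > s + 1:
--         raise ValueError("need 1 <= t <= s + 1 and s >= 1")
--     z = t - 1
--
--     def combos(lo, z):
--         # z-element ascending index lists drawn from range(lo, s), lexicographic order
--         if z == 0:
--             return [[]]
--         return [[a] + rest for a in range(lo, s - z + 1) for rest in combos(a + 1, z - 1)]
--
--     result = [[] for _ in range(s)]
--     for i, zeros in enumerate(reversed(combos(0, z))):
--         zs = set(zeros)
--         for k in range(s):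
--             if k not in zs:
--                 result[k].append(i)
--     return result
-- ===== Notes on version B (the rewrite author's own statement) =====
-- stated objective: alternative
-- what changed: Replaces A's recursive binary-string generation (generate_binary with repeated insert(0,..) shifting) and its separate naive recursive binomial count comb(s,t-1) by a direct recursive enumeration of the zero-position index combinations, read in reverse with enumerate; key membership is decided by a set lookup instead of reading an indicator bit vector.
import Mathlib
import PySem

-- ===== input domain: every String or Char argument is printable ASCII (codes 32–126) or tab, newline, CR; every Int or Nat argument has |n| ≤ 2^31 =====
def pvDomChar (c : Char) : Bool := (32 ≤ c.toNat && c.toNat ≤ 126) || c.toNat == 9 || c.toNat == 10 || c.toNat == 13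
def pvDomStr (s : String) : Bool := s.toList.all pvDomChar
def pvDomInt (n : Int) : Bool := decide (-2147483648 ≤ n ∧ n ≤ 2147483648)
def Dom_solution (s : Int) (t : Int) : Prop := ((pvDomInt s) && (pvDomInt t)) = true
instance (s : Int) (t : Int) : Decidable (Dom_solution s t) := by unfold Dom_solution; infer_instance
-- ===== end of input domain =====

-- B replaces A's recursive binary-string generation (and its recursive binomial count) by a direct
-- recursive enumeration of the zero-position combinations, read in reverse with enumerate.

-- ===== PORT A =====

-- comb(n, r): Python recurses forever when n < 0 with r ∉ {0, n} (excluded by Pre_); 0 there is a placeholder.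
def combA (n r : Int) : Int :=
  if n == 0 then 1
  else if r == 0 || r == n then 1
  else if n < 0 then 0
  else combA (n - 1) (r - 1) + combA (n - 1) r
termination_by n.toNat
decreasing_by all_goals (simp_all; omega)

-- generate_binary(size, z): Python recurses forever when size ≤ 0 (excluded by Pre_); [] there is a placeholder.
def genBinary (size z : Int) : List (List Int) :=
  if size ≤ 0 then []
  else if size == 1 then
    if z == 1 then [[0]] else [[1]]
  else if size == z then
    (genBinary (size - 1) (z - 1)).map (fun k => 0 :: k)
  else
    let addOne := (genBinary (size - 1) z).map (fun j => 1 :: j)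
    if z == 0 then addOne
    else (genBinary (size - 1) (z - 1)).map (fun k => 0 :: k) ++ addOne
termination_by size.toNat
decreasing_by all_goals omega

def solution (s : Int) (t : Int) : List (List Int) :=
  let n := combA s (t - 1)
  let _m := combA (s - 1) (t - 1)
  let binaryList := genBinary s (t - 1)
  let solutionList := (PySem.List.pyRange 0 s).foldl (fun acc _ => acc ++ [([] : List Int)]) []
  (PySem.List.pyRange 0 n).foldl (fun sol i =>
    let targetList := PySem.List.pyGetD binaryList (-i - 1) []
    (PySem.List.pyRange 0 s).foldl (fun sol2 k =>
      if PySem.List.pyGetD targetList k 0 == 1 then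
        sol2.modify k.toNat (fun l => l ++ [i])
      else sol2) sol) solutionList

-- ===== PORT B =====

-- combos(lo, z) (closure over s): Python recurses forever when z < 0 (excluded by Pre_); [] there is a placeholder.
def combosB (s lo z : Int) : List (List Int) :=
  if z ≤ 0 then (if z == 0 then [[]] else [])
  else (PySem.List.pyRange lo (s - z + 1)).flatMap (fun a =>
    (combosB s (a + 1) (z - 1)).map (fun rest => a :: rest))
termination_by z.toNat
decreasing_by all_goals omega

def solution_alt (s : Int) (t : Int) : List (List Int) :=
  -- Python B raises ValueError when s < 1 ∨ t < 1 ∨ t > s + 1 (outside Pre_); [] there is a placeholder.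
  if s < 1 ∨ t < 1 ∨ t > s + 1 then []
  else
  let z := t - 1
  let result := (PySem.List.pyRange 0 s).map (fun _ => ([] : List Int))
  (PySem.List.enumerate (combosB s 0 z).reverse).foldl (fun res p =>
    let zs : PySem.Set Int := PySem.Set.ofList p.2
    (PySem.List.pyRange 0 s).foldl (fun res2 k =>
      if k ∈ zs then res2
      else res2.modify k.toNat (fun l => l ++ [p.1])) res) result

-- ===== PRECONDITION & SPEC =====
-- Exactly the inputs on which the Python A returns normally: outside 1 ≤ s ∧ 1 ≤ t ≤ s+1 it raises
-- (IndexError on binaryList[-i-1] / targetList[k], or RecursionError in comb/generate_binary).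
def Pre_solution (s : Int) (t : Int) : Prop := 1 ≤ s ∧ 1 ≤ t ∧ t ≤ s + 1
instance (s : Int) (t : Int) : Decidable (Pre_solution s t) := by unfold Pre_solution; infer_instance
def pvWitness_solution : Int × Int := (4, 3)

def Spec_solution (s : Int) (t : Int) (out : List (List Int)) : Prop := out = solution_alt s t
instance (s : Int) (t : Int) (out : List (List Int)) : Decidable (Spec_solution s t out) := by unfold Spec_solution; infer_instance

-- ===== CLAIM (what is proved, stated in full; the proofs are below) =====
def Claim_equal_solution : Prop := ∀ (s : Int) (t : Int), Dom_solution s t → Pre_solution s t → Spec_solution s t (solution s t)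

-- ===== LEMMAS AND PROOFS =====

-- indicator vector of length `size` over positions lo, lo+1, …: 0 at positions in c, 1 elsewhere
def indVec (lo size : Int) (c : List Int) : List Int :=
  (PySem.List.pyRange lo (lo + size)).map (fun j => if j ∈ c then (0 : Int) else 1)

theorem combosB_nil (s lo z : Int) (h1 : 1 ≤ z) (h2 : s - z + 1 ≤ lo) : combosB s lo z = [] := by
  unfold combosB
  rw [if_neg (by omega), PySem.List.pyRange_one_eq_nil h2]
  rfl

theorem combosB_split (s lo z : Int) (h1 : 1 ≤ z) (h2 : lo ≤ s - z) :
    combosB s lo z =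
      (combosB s (lo + 1) (z - 1)).map (fun rest => lo :: rest) ++ combosB s (lo + 1) z := by
  conv_lhs => rw [combosB]
  rw [if_neg (by omega), PySem.List.pyRange_one_cons (by omega), List.flatMap_cons]
  congr 1
  conv_rhs => rw [combosB]
  rw [if_neg (by omega)]

theorem combosB_mem_lo (s z lo : Int) : ∀ c ∈ combosB s lo z, ∀ x ∈ c, lo ≤ x := by
  unfold combosB
  split
  · split <;> simp
  · intro c hc x hx
    simp only [List.mem_flatMap, List.mem_map] at hc
    obtain ⟨a, ha, rest, hrest, rfl⟩ := hc
    have ha' := PySem.List.mem_pyRange_one.mp ha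
    rcases List.mem_cons.mp hx with rfl | hx'
    · omega
    · have := combosB_mem_lo s (z - 1) (a + 1) rest hrest x hx'
      omega
termination_by z.toNat
decreasing_by omega

theorem indVec_cons_zero (lo size : Int) (c : List Int) (h : 1 ≤ size) :
    indVec lo size (lo :: c) = 0 :: indVec (lo + 1) (size - 1) c := by
  unfold indVec
  rw [PySem.List.pyRange_one_cons (by omega), List.map_cons, if_pos (by simp)]
  have he : lo + size = lo + 1 + (size - 1) := by ring
  rw [he]
  congr 1
  apply List.map_congr_left
  intro j hj
  have hj' := PySem.List.mem_pyRange_one.mp hj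
  have : j ≠ lo := by omega
  simp [List.mem_cons, this]

theorem indVec_one (lo size : Int) (c : List Int) (h : 1 ≤ size) (hc : ∀ x ∈ c, lo + 1 ≤ x) :
    indVec lo size c = 1 :: indVec (lo + 1) (size - 1) c := by
  unfold indVec
  rw [PySem.List.pyRange_one_cons (by omega), List.map_cons, if_neg (fun hmem => by have := hc lo hmem; omega)]
  have he : lo + size = lo + 1 + (size - 1) := by ring
  rw [he]

theorem enumerate_map {α β : Type} (g : α → β) : ∀ (l : List α) (st : Int),
    PySem.List.enumerate (l.map g) st = (PySem.List.enumerate l st).map (fun p => (p.1, g p.2)) := by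
  intro l
  induction l with
  | nil => intro st; simp [PySem.List.enumerate_nil]
  | cons x xs ih => intro st; simp [PySem.List.enumerate_cons, ih]

theorem combA_eq_choose (n r : Int) (h0 : 0 ≤ r) (h1 : r ≤ n) :
    combA n r = (Nat.choose n.toNat r.toNat : Int) := by
  unfold combA
  split
  · next h =>
    simp only [beq_iff_eq] at h
    subst h
    have : r = 0 := by omega
    subst this
    simp
  · next h =>
    split
    · next h2 =>
      simp only [Bool.or_eq_true, beq_iff_eq] at h2
      rcases h2 with rfl | rfl
      · simp
      · simp
    · next h2 =>
      simp only [Bool.or_eq_true, beq_iff_eq, not_or] at h h2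
      rw [if_neg (by omega)]
      rw [combA_eq_choose (n-1) (r-1) (by omega) (by omega),
          combA_eq_choose (n-1) r (by omega) (by omega)]
      have e1 : n.toNat = (n-1).toNat + 1 := by omega
      have e2 : r.toNat = (r-1).toNat + 1 := by omega
      rw [e1, e2, Nat.choose_succ_succ]
      push_cast
      ring
termination_by n.toNat
decreasing_by all_goals (simp_all; omega)

theorem genBinary_length (size z : Int) (h1 : 1 ≤ size) (h2 : 0 ≤ z) (h3 : z ≤ size) :
    (genBinary size z).length = Nat.choose size.toNat z.toNat := by
  unfold genBinary
  rw [if_neg (by omega)]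
  split
  · next h =>
    simp only [beq_iff_eq] at h
    subst h
    split
    · next hz => simp_all
    · next hz =>
      simp only [beq_iff_eq] at hz
      have : z = 0 := by omega
      subst this
      simp
  · next h =>
    simp only [beq_iff_eq] at h
    split
    · next hz =>
      simp only [beq_iff_eq] at hz
      subst hz
      rw [List.length_map, genBinary_length (size-1) (size-1) (by omega) (by omega) (by omega)]
      rw [Nat.choose_self, Nat.choose_self]
    · next hz =>
      simp only [beq_iff_eq] at hz
      split
      · next hz0 =>
        simp only [beq_iff_eq] at hz0
        subst hz0
        rw [List.length_map, genBinary_length (size-1) 0 (by omega) (by omega) (by omega)]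
        simp
      · next hz0 =>
        simp only [beq_iff_eq] at hz0
        simp only [List.length_append, List.length_map]
        rw [genBinary_length (size-1) (z-1) (by omega) (by omega) (by omega),
            genBinary_length (size-1) z (by omega) (by omega) (by omega)]
        have e1 : size.toNat = (size-1).toNat + 1 := by omega
        have e2 : z.toNat = (z-1).toNat + 1 := by omega
        rw [e1, e2, Nat.choose_succ_succ]
termination_by size.toNat
decreasing_by all_goals omega

theorem genBinary_eq (s : Int) (size z : Int) (h1 : 1 ≤ size) (h2 : 0 ≤ z) (h3 : z ≤ size) :
    genBinary size z = (combosB s (s - size) z).map (indVec (s - size) size) := by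
  unfold genBinary
  rw [if_neg (by omega)]
  split
  · next h =>
    simp only [beq_iff_eq] at h
    subst h
    have hr : PySem.List.pyRange (s - 1) (s - 1 + 1) = [s - 1] := PySem.List.pyRange_one_singleton (s-1)
    split
    · next hz =>
      simp only [beq_iff_eq] at hz
      subst hz
      have hc : combosB s (s - 1) 1 = [[s - 1]] := by
        unfold combosB
        rw [if_neg (by omega), hr]
        have h0 : ∀ w : Int, combosB s w 0 = [[]] := fun w => by unfold combosB; simp
        simp [h0]
      rw [hc]
      simp only [List.map_cons, List.map_nil]
      unfold indVec
      rw [hr]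
      simp
    · next hz =>
      have hz0 : z = 0 := by simp only [beq_iff_eq] at hz; omega
      subst hz0
      have hc : combosB s (s - 1) 0 = [[]] := by unfold combosB; simp
      rw [hc]
      simp only [List.map_cons, List.map_nil]
      unfold indVec
      rw [hr]
      simp
  · next h =>
    simp only [beq_iff_eq] at h
    have hs2 : 2 ≤ size := by omega
    split
    · next hz =>
      -- size == z branch
      simp only [beq_iff_eq] at hz
      subst hz
      rw [combosB_split s (s - size) size (by omega) (by omega),
          combosB_nil s (s - size + 1) size (by omega) (by omega)]
      rw [List.append_nil, List.map_map]
      rw [genBinary_eq s (size - 1) (size - 1) (by omega) (by omega) (by omega)]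
      have he : s - (size - 1) = s - size + 1 := by ring
      rw [he, List.map_map]
      apply List.map_congr_left
      intro c hc
      simp only [Function.comp_apply]
      rw [indVec_cons_zero (s - size) size c (by omega)]
    · next hz =>
      simp only [beq_iff_eq] at hz
      split
      · next hz0 =>
        simp only [beq_iff_eq] at hz0
        subst hz0
        have hc : combosB s (s - size) 0 = [[]] := by unfold combosB; simp
        rw [hc, genBinary_eq s (size - 1) 0 (by omega) (by omega) (by omega)]
        have hc2 : combosB s (s - (size - 1)) 0 = [[]] := by unfold combosB; simp
        rw [hc2]
        simp only [List.map_cons, List.map_nil]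
        rw [indVec_one (s - size) size [] (by omega) (by simp)]
        have he : s - (size - 1) = s - size + 1 := by ring
        rw [he]
      · next hz0 =>
        simp only [beq_iff_eq] at hz0
        show List.map (fun k => (0:Int) :: k) (genBinary (size - 1) (z - 1)) ++
            List.map (fun j => (1:Int) :: j) (genBinary (size - 1) z) = _
        rw [combosB_split s (s - size) z (by omega) (by omega)]
        rw [List.map_append, List.map_map]
        have he : s - (size - 1) = s - size + 1 := by ring
        congr 1
        · rw [genBinary_eq s (size - 1) (z - 1) (by omega) (by omega) (by omega), he, List.map_map]
          apply List.map_congr_left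
          intro c hc
          simp only [Function.comp_apply]
          rw [indVec_cons_zero (s - size) size c (by omega)]
        · rw [genBinary_eq s (size - 1) z (by omega) (by omega) (by omega), he, List.map_map]
          apply List.map_congr_left
          intro c hc
          simp only [Function.comp_apply]
          rw [indVec_one (s - size) size c (by omega)
                (fun x hx => by
                  have := combosB_mem_lo s z (s - size + 1) c hc x hx
                  omega)]
termination_by size.toNat
decreasing_by all_goals omega

theorem foldl_pyRange_neg_index {α β : Type} (bl : List α) (d : α) (f : β → Int → α → β) (init : β) :
    (PySem.List.pyRange 0 (bl.length : Int)).foldl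
        (fun st i => f st i (PySem.List.pyGetD bl (-i - 1) d)) init
      = (PySem.List.enumerate bl.reverse).foldl (fun st p => f st p.1 p.2) init := by
  rw [PySem.List.enumerate_eq_map_pyRange bl.reverse d, List.foldl_map]
  have hlen : PySem.List.len bl.reverse = (bl.length : Int) := by
    simp [PySem.List.len_eq]
  rw [hlen]
  apply PySem.List.foldl_congr_mem
  intro acc j hj
  have hj' := PySem.List.mem_pyRange_one.mp hj
  congr 1
  have h1 : PySem.List.pyGetD bl.reverse j d = bl.reverse[j.toNat]'(by simp; omega) := by
    exact PySem.List.pyGetD_eq_getElem bl.reverse d (by omega) (by simp; omega)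
  have h2 : PySem.List.pyGetD bl (-j - 1) d = bl[bl.length - (j.toNat + 1)]'(by omega) := by
    have he : -j - 1 = -((j.toNat + 1 : Nat) : Int) := by push_cast; omega
    rw [he]
    exact PySem.List.pyGetD_neg_natCast bl (j.toNat + 1) d (by omega) (by omega)
  rw [h1, h2, List.getElem_reverse]
  simp only []
  congr 1
  omega

-- ===== VERDICT (by name: the statement is the Claim_ definition above) =====
theorem solution_spec : Claim_equal_solution := by
  intro s t _hDom hPre
  obtain ⟨hs, ht1, ht2⟩ := hPre
  unfold Spec_solution solution solution_alt
  rw [if_neg (by omega)]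
  dsimp only
  have hgb : genBinary s (t - 1) = (combosB s 0 (t - 1)).map (indVec 0 s) := by
    have h := genBinary_eq s s (t - 1) (by omega) (by omega) (by omega)
    simpa using h
  have hn : combA s (t - 1) = ((genBinary s (t - 1)).length : Int) := by
    rw [combA_eq_choose s (t - 1) (by omega) (by omega),
        genBinary_length s (t - 1) (by omega) (by omega) (by omega)]
  have hinit : (PySem.List.pyRange 0 s).foldl (fun acc _ => acc ++ [([] : List Int)]) [] =
      (PySem.List.pyRange 0 s).map (fun _ => ([] : List Int)) := by
    simpa only [List.nil_append] using PySem.List.foldl_append_singleton_eq_map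
      (fun _ => ([] : List Int)) (PySem.List.pyRange 0 s) []
  rw [hn, hinit]
  refine Eq.trans (foldl_pyRange_neg_index (genBinary s (t - 1)) []
      (fun st i tl => (PySem.List.pyRange 0 s).foldl
        (fun sol2 k => if PySem.List.pyGetD tl k 0 == 1 then
            sol2.modify k.toNat (fun l => l ++ [i]) else sol2) st)
      ((PySem.List.pyRange 0 s).map (fun _ => ([] : List Int)))) ?_
  rw [hgb, ← List.map_reverse, enumerate_map, List.foldl_map]
  apply PySem.List.foldl_congr_mem
  intro acc p _hp
  apply PySem.List.foldl_congr_mem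
  intro acc2 k hk
  have hk' := PySem.List.mem_pyRange_one.mp hk
  have hind : PySem.List.pyGetD (indVec 0 s p.2) k 0 = if k ∈ p.2 then 0 else 1 := by
    unfold indVec
    have h := PySem.List.pyGetD_map_pyRange_of_nonneg
      (fun j => if j ∈ p.2 then (0 : Int) else 1) s k 0 hk'.1 hk'.2
    simpa using h
  rw [hind]
  by_cases hmem : k ∈ p.2
  · simp [hmem, PySem.Set.mem_ofList]
  · simp [hmem, PySem.Set.mem_ofList]
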